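-- pv_equiv track=rewrite | github.com/MrBrantCode/unitest_baseline | mut_generate/mist_train_taco/taco_16398/solution.py | min_recolors_to_avoid_adjacent_black_white
-- ===== SOURCE A (Python) =====
-- def min_recolors_to_avoid_adjacent_black_white(N, S):
--     black = 0
--     white = S.count('.')
--     ans = white
--
--     for i in range(N):
--         if S[i] == '#':
--             black += 1
--         else:
--             white -= 1
--         ans = min(ans, black + white)
--
--     return ans
-- ===== SOURCE B (Python) =====
-- def min_recolors_to_avoid_adjacent_black_white(N, S):
--     total_dot = S.count('.')
--     # phase 1: prefix-count table of '#' over all of S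
--     pre_hash = [0]
--     for c in S:
--         pre_hash.append(pre_hash[-1] + (c == '#'))
--     # phase 2: minimise the split cost over positions k = 0..N
--     # (every non-'#' char left of the split counts against the '.'-total)
--     costs = [2 * pre_hash[k] - k + total_dot for k in range(N + 1)]
--     return min(costs, default=total_dot)
-- ===== Notes on version B (the rewrite author's own statement) =====
-- stated objective: alternative
-- what changed: A's single interleaved loop maintaining running black/white counts and a running minimum is replaced by a table-build phase (prefix-count array of '#') followed by a separate min-reduction over the split-cost list for k = 0..N.
import Mathlib
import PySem

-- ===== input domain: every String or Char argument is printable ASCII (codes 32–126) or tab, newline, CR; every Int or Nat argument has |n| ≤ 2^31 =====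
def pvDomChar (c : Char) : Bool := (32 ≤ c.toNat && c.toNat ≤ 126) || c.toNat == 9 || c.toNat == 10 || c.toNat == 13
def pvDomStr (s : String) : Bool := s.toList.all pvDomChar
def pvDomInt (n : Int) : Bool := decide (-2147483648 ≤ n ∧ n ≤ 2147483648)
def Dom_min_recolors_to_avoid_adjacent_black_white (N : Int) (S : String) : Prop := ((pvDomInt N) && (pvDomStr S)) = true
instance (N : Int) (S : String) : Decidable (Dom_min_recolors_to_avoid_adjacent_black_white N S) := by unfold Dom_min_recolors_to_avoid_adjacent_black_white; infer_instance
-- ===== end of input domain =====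

-- B replaces A's interleaved running-count loop by a prefix-count table plus a separate
-- min-reduction over split positions (objective: alternative decomposition, same cost).

-- ===== PORT A =====
-- loop body of A: state (black, white, ans); any non-'#' char decrements white
def pvStepA (S : String) (st : Int × Int × Int) (i : Int) : Int × Int × Int :=
  let bw : Int × Int :=
    if PySem.Str.pyGet? S i = some '#' then (st.1 + 1, st.2.1) else (st.1, st.2.1 - 1)
  (bw.1, bw.2, min st.2.2 (bw.1 + bw.2))

def min_recolors_to_avoid_adjacent_black_white (N : Int) (S : String) : Int :=
  let white : Int := (PySem.Str.count S "." : Int)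
  ((PySem.List.pyRange 0 N 1).foldl (pvStepA S) (0, white, white)).2.2

-- ===== PORT B =====
-- phase-1 body of B: append pre_hash[-1] + (c == '#')
def pvBuildB (acc : List Int) (c : Char) : List Int :=
  acc ++ [(PySem.List.pyGet? acc (-1)).getD 0 + (if c = '#' then 1 else 0)]

def min_recolors_to_avoid_adjacent_black_white_alt (N : Int) (S : String) : Int :=
  let total : Int := (PySem.Str.count S "." : Int)
  let preHash : List Int := S.toList.foldl pvBuildB [0]
  let costs : List Int := (PySem.List.pyRange 0 (N + 1) 1).map
    (fun k => 2 * (PySem.List.pyGet? preHash k).getD 0 - k + total)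
  PySem.List.minD costs (fun x => x) total

-- ===== PRECONDITION & SPEC =====
-- A raises IndexError (S[i]) as soon as N exceeds len(S); exactly those inputs are excluded.
def Pre_min_recolors_to_avoid_adjacent_black_white (N : Int) (S : String) : Prop :=
  N ≤ (S.toList.length : Int)
instance (N : Int) (S : String) : Decidable (Pre_min_recolors_to_avoid_adjacent_black_white N S) := by unfold Pre_min_recolors_to_avoid_adjacent_black_white; infer_instance
def pvWitness_min_recolors_to_avoid_adjacent_black_white : Int × String := (2, "#.")

def Spec_min_recolors_to_avoid_adjacent_black_white (N : Int) (S : String) (out : Int) : Prop := out = min_recolors_to_avoid_adjacent_black_white_alt N S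
instance (N : Int) (S : String) (out : Int) : Decidable (Spec_min_recolors_to_avoid_adjacent_black_white N S out) := by unfold Spec_min_recolors_to_avoid_adjacent_black_white; infer_instance

-- ===== CLAIM (what is proved, stated in full; the proofs are below) =====
def Claim_equal_min_recolors_to_avoid_adjacent_black_white : Prop := ∀ (N : Int) (S : String), Dom_min_recolors_to_avoid_adjacent_black_white N S → Pre_min_recolors_to_avoid_adjacent_black_white N S → Spec_min_recolors_to_avoid_adjacent_black_white N S (min_recolors_to_avoid_adjacent_black_white N S)

-- ===== LEMMAS AND PROOFS =====

-- cost of splitting after the first k characters (A's black + white there)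
def pvCost (l : List Char) (t : Int) (k : Nat) : Int :=
  2 * ((l.take k).count '#' : Int) - (k : Int) + t

-- A's running answer after m loop iterations
def pvAnsA (l : List Char) (t : Int) : Nat → Int
  | 0 => t
  | m + 1 => min (pvAnsA l t m) (pvCost l t (m + 1))

lemma pvBuild_eq (l : List Char) :
    l.foldl pvBuildB [0] =
      (List.range (l.length + 1)).map (fun k => ((l.take k).count '#' : Int)) := by
  induction l using List.reverseRecOn with
  | nil => simp [List.range_succ]
  | append_singleton l c ih =>
      rw [List.foldl_append]
      simp only [List.foldl_cons, List.foldl_nil, ih, pvBuildB]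
      have hlen : (l ++ [c]).length + 1 = (l.length + 1) + 1 := by simp
      rw [hlen, List.range_succ (n := l.length + 1), List.map_append]
      congr 1
      · apply List.map_congr_left
        intro k hk
        rw [List.mem_range] at hk
        rw [List.take_append_of_le_length (by omega)]
      · have hlast : ((List.range (l.length + 1)).map
            (fun k => ((l.take k).count '#' : Int))).getLast? =
            some ((l.take l.length).count '#' : Int) := by
          rw [List.range_succ, List.map_append]
          simp
        simp only [PySem.List.pyGet?_neg_one, hlast, Option.getD_some, List.map_cons, List.map_nil]
        have htake : (l ++ [c]).take (l.length + 1) = l ++ [c] := by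
          apply List.take_of_length_le; simp
        rw [htake, List.take_length, List.count_append]
        by_cases hc : c = '#' <;> simp [hc]

lemma pvFoldA_eq (S : String) (t : Int) (m : Nat) (hm : m ≤ S.toList.length) :
    (PySem.List.pyRange 0 (m : Int) 1).foldl (pvStepA S) (0, t, t) =
      (((S.toList.take m).count '#' : Int),
       t - ((m : Int) - ((S.toList.take m).count '#' : Int)),
       pvAnsA S.toList t m) := by
  induction m with
  | zero => simp [PySem.List.pyRange_one_eq_nil, pvAnsA]
  | succ m ih =>
      have hm' : m ≤ S.toList.length := by omega
      have hlt : m < S.toList.length := by omega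
      have hcast : ((m : Int) + 1) = ((m + 1 : Nat) : Int) := by push_cast; ring
      rw [← hcast, PySem.List.pyRange_one_succ_right (by positivity), List.foldl_append]
      rw [ih hm']
      have hget : PySem.Str.pyGet? S (m : Int) = some S.toList[m] := by
        simp [List.getElem?_eq_getElem hlt]
      have htake : (S.toList.take (m + 1)).count '#' =
          (S.toList.take m).count '#' + (if S.toList[m] = '#' then 1 else 0) := by
        simp only [List.take_add_one, List.getElem?_eq_getElem hlt, Option.toList_some,
          List.count_append, List.count_cons, List.count_nil, beq_iff_eq]
        by_cases hc : S.toList[m] = '#' <;> simp [hc]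
      simp only [List.foldl_cons, List.foldl_nil, pvStepA, hget, pvAnsA]
      by_cases hc : S.toList[m] = '#' <;>
        · simp only [hc, Option.some.injEq, if_true, if_false]
          refine Prod.ext ?_ (Prod.ext ?_ ?_) <;>
            simp [htake, hc, pvCost] <;> omega

lemma pvAnsA_eq_foldl (l : List Char) (t : Int) (m : Nat) :
    pvAnsA l t m = (List.range m).foldl (fun a k => min a (pvCost l t (k + 1))) (pvCost l t 0) := by
  induction m with
  | zero => simp [pvAnsA, pvCost]
  | succ m ih => rw [List.range_succ, List.foldl_append]; simp [pvAnsA, ih]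

lemma pvAlt_eq (S : String) (m : Nat) (hm : m ≤ S.toList.length) :
    min_recolors_to_avoid_adjacent_black_white_alt (m : Int) S =
      pvAnsA S.toList ((PySem.Str.count S "." : Int)) m := by
  unfold min_recolors_to_avoid_adjacent_black_white_alt
  set t : Int := (PySem.Str.count S "." : Int) with ht
  set l := S.toList with hl
  have hcosts : (PySem.List.pyRange 0 ((m : Int) + 1) 1).map
      (fun k => 2 * (PySem.List.pyGet? (l.foldl pvBuildB [0]) k).getD 0 - k + t) =
      (List.range (m + 1)).map (fun k => pvCost l t k) := by
    have hr : PySem.List.pyRange 0 ((m : Int) + 1) 1 =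
        List.map (fun k : Nat => (k : Int)) (List.range (m + 1)) := by
      have : ((m : Int) + 1) = ((m + 1 : Nat) : Int) := by push_cast; ring
      rw [this, PySem.List.pyRange_one]
      simp only [sub_zero, Int.toNat_natCast, zero_add]
    rw [hr, List.map_map]
    apply List.map_congr_left
    intro k hk
    rw [List.mem_range] at hk
    have hget : PySem.List.pyGet? (l.foldl pvBuildB [0]) (k : Int) =
        some ((l.take k).count '#' : Int) := by
      rw [pvBuild_eq, PySem.List.pyGet?_natCast]
      rw [List.getElem?_map, List.getElem?_range (by omega)]
      rfl
    simp [hget, pvCost]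
  simp only [hcosts]
  rw [List.range_succ_eq_map, List.map_cons, List.map_map]
  rw [PySem.List.minD, PySem.List.min?_id_cons, Option.getD_some]
  rw [List.foldl_map, pvAnsA_eq_foldl]
  rfl

-- ===== VERDICT (by name: the statement is the Claim_ definition above) =====
theorem min_recolors_to_avoid_adjacent_black_white_spec : Claim_equal_min_recolors_to_avoid_adjacent_black_white := by
  intro N S _ hPre
  unfold Spec_min_recolors_to_avoid_adjacent_black_white
  by_cases hN : 0 ≤ N
  · obtain ⟨m, rfl⟩ : ∃ m : Nat, N = (m : Int) := ⟨N.toNat, (Int.toNat_of_nonneg hN).symm⟩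
    have hm : m ≤ S.toList.length := by
      unfold Pre_min_recolors_to_avoid_adjacent_black_white at hPre; exact_mod_cast hPre
    rw [pvAlt_eq S m hm]
    unfold min_recolors_to_avoid_adjacent_black_white
    simp only [pvFoldA_eq S _ m hm]
  · have h1 : PySem.List.pyRange 0 N 1 = [] := PySem.List.pyRange_one_eq_nil (by omega)
    have h2 : PySem.List.pyRange 0 (N + 1) 1 = [] := PySem.List.pyRange_one_eq_nil (by omega)
    simp [min_recolors_to_avoid_adjacent_black_white,
      min_recolors_to_avoid_adjacent_black_white_alt, h1, h2, PySem.List.minD, PySem.List.min?]
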